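-- pv_equiv track=rewrite | github.com/manyashetty20/Research-Agent | deepscholar-bench/data_pipeline/latex_extractor.py | _remove_latex_comments
-- ===== SOURCE A (Python) =====
-- def _remove_latex_comments(text: str) -> str:
--     """Remove LaTeX comments from text while preserving line structure."""
--     lines = text.split("\n")
--     cleaned_lines = []
--
--     for line in lines:
--         # Find the first unescaped % character
--         # We need to handle escaped % characters (\%)
--         i = 0
--         comment_start = -1
--
--         while i < len(line):
--             if line[i] == "%":
--                 # Check if this % is escaped by counting preceding backslashes
--                 backslash_count = 0
--                 j = i - 1
--                 while j >= 0 and line[j] == "\\":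
--                     backslash_count += 1
--                     j -= 1
--
--                 # If even number of backslashes (including 0), the % is not escaped
--                 if backslash_count % 2 == 0:
--                     comment_start = i
--                     break
--             i += 1
--
--         if comment_start >= 0:
--             # Remove everything from the comment character onwards
--             cleaned_line = line[:comment_start].rstrip()
--         else:
--             cleaned_line = line
--
--         cleaned_lines.append(cleaned_line)
--
--     return "\n".join(cleaned_lines)
-- ===== SOURCE B (Python) =====
-- def _remove_latex_comments(text: str) -> str:
--     """Remove LaTeX comments from text while preserving line structure.
--
--     Single pass per line: track the length of the current run of consecutive
--     backslashes; a '%' is a comment start iff that run length is even.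
--     """
--     out = []
--     for line in text.split("\n"):
--         bs = 0
--         cut = None
--         for i, ch in enumerate(line):
--             if ch == "%" and bs % 2 == 0:
--                 cut = i
--                 break
--             bs = bs + 1 if ch == "\\" else 0
--         out.append(line if cut is None else line[:cut].rstrip())
--     return "\n".join(out)
-- ===== Notes on version B (the rewrite author's own statement) =====
-- stated objective: faster
-- what changed: Replaces A's per-percent-sign backward rescan counting preceding backslashes with a single left-to-right pass per line that maintains the running consecutive-backslash count, turning worst-case quadratic line scanning into linear.
import Mathlib
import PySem

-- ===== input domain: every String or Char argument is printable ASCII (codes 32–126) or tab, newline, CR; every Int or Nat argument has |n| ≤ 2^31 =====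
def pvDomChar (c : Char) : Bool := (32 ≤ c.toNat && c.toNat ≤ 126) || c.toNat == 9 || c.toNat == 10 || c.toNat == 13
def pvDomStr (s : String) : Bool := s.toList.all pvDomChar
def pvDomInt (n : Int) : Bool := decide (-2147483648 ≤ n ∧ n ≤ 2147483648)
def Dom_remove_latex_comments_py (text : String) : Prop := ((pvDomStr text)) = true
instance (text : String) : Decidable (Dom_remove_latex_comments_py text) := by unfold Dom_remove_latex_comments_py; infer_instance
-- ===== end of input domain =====

-- B replaces A's per-percent-sign backward backslash-counting rescans by one left-to-right pass per
-- line that tracks the running consecutive-backslash count (objective: faster, asymptotic).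


-- ===== PORT A =====
-- A's inner while loop: count backslashes at positions k-1, k-2, … (k encodes Python's j+1)
def pvCountBSA (cs : List Char) : Nat → Nat → Nat
  | 0, acc => acc
  | k+1, acc => if cs[k]? = some '\\' then pvCountBSA cs k (acc + 1) else acc

-- A's outer while loop over i, returning comment_start (-1 if none)
def pvFindCommentA (cs : List Char) (i : Nat) : Int :=
  if h : i < cs.length then
    if cs[i] = '%' then
      if pvCountBSA cs i 0 % 2 = 0 then (i : Int) else pvFindCommentA cs (i + 1)
    else pvFindCommentA cs (i + 1)
  else -1
termination_by cs.length - i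

def pvLineA (cs : List Char) : List Char :=
  let c := pvFindCommentA cs 0
  if 0 ≤ c then PySem.Chars.rstrip (PySem.List.slice cs none (some c)) else cs

def remove_latex_comments_py (text : String) : String :=
  String.mk (PySem.Chars.join ['\n'] ((PySem.Chars.splitOn text.toList ['\n']).map pvLineA))

-- ===== PORT B =====
-- B's single pass: i = current index, bs = length of the current run of backslashes
def pvFindCutB : List Char → Nat → Nat → Option Nat
  | [], _, _ => none
  | c :: rest, i, bs =>
    if c = '%' ∧ bs % 2 = 0 then some i
    else pvFindCutB rest (i + 1) (if c = '\\' then bs + 1 else 0)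

def pvLineB (cs : List Char) : List Char :=
  match pvFindCutB cs 0 0 with
  | some k => PySem.Chars.rstrip (cs.take k)
  | none => cs

def remove_latex_comments_py_alt (text : String) : String :=
  String.mk (PySem.Chars.join ['\n'] ((PySem.Chars.splitOn text.toList ['\n']).map pvLineB))

-- ===== PRECONDITION & SPEC =====
def Spec_remove_latex_comments_py (text : String) (out : String) : Prop := out = remove_latex_comments_py_alt text
instance (text : String) (out : String) : Decidable (Spec_remove_latex_comments_py text out) := by unfold Spec_remove_latex_comments_py; infer_instance

-- ===== CLAIM (what is proved, stated in full; the proofs are below) =====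
def Claim_equal_remove_latex_comments_py : Prop := ∀ (text : String), Dom_remove_latex_comments_py text → Spec_remove_latex_comments_py text (remove_latex_comments_py text)

-- ===== LEMMAS AND PROOFS =====
theorem pvCountBSA_shift (cs : List Char) (k acc : Nat) :
    pvCountBSA cs k acc = pvCountBSA cs k 0 + acc := by
  induction k generalizing acc with
  | zero => simp [pvCountBSA]
  | succ k ih =>
    simp only [pvCountBSA]
    split
    · rw [ih (acc + 1), ih 1]; omega
    · omega

theorem pvCountBSA_succ (cs : List Char) (k : Nat) (c : Char) (hk : cs[k]? = some c) :
    pvCountBSA cs (k + 1) 0 = if c = '\\' then pvCountBSA cs k 0 + 1 else 0 := by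
  simp only [pvCountBSA, hk]
  by_cases hc : c = '\\'
  · subst hc
    rw [if_pos rfl, if_pos rfl, pvCountBSA_shift]
  · have : some c ≠ some '\\' := by simpa using hc
    rw [if_neg this, if_neg hc]

theorem pvMain (suf pre : List Char) :
    pvFindCommentA (pre ++ suf) pre.length =
      (match pvFindCutB suf pre.length (pvCountBSA (pre ++ suf) pre.length 0) with
       | some k => (k : Int)
       | none => -1) := by
  induction suf generalizing pre with
  | nil =>
    rw [pvFindCommentA]
    simp [pvFindCutB]
  | cons c rest ih =>
    have hlen : pre.length < (pre ++ c :: rest).length := by simp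
    have hget : (pre ++ c :: rest)[pre.length] = c := by
      rw [List.getElem_append_right (le_refl pre.length)]; simp
    have hget? : (pre ++ c :: rest)[pre.length]? = some c := by
      rw [List.getElem?_eq_getElem hlen, hget]
    have hstep : pvCountBSA (pre ++ c :: rest) (pre.length + 1) 0 =
        if c = '\\' then pvCountBSA (pre ++ c :: rest) pre.length 0 + 1 else 0 :=
      pvCountBSA_succ _ _ _ hget?
    have hre : (pre ++ [c]) ++ rest = pre ++ c :: rest := by simp
    have hlen' : (pre ++ [c]).length = pre.length + 1 := by simp
    have ihc := ih (pre ++ [c])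
    rw [hre, hlen'] at ihc
    rw [pvFindCommentA, dif_pos hlen, hget]
    simp only [pvFindCutB]
    by_cases hc : c = '%'
    · subst hc
      by_cases hpar : pvCountBSA (pre ++ '%' :: rest) pre.length 0 % 2 = 0
      · have hcb : ('%' : Char) = '%' ∧ pvCountBSA (pre ++ '%' :: rest) pre.length 0 % 2 = 0 :=
          ⟨rfl, hpar⟩
        rw [if_pos rfl, if_pos hpar, if_pos hcb]
      · have hcb : ¬ (('%' : Char) = '%' ∧ pvCountBSA (pre ++ '%' :: rest) pre.length 0 % 2 = 0) :=
          fun h => hpar h.2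
        rw [if_pos rfl, if_neg hpar, if_neg hcb, ihc, hstep]
    · have hcb : ¬ (c = '%' ∧ pvCountBSA (pre ++ c :: rest) pre.length 0 % 2 = 0) :=
        fun h => hc h.1
      rw [if_neg hc, if_neg hcb, ihc, hstep]

theorem pvLine_eq (cs : List Char) : pvLineA cs = pvLineB cs := by
  have h := pvMain cs []
  simp only [List.nil_append, List.length_nil] at h
  have h0 : pvCountBSA cs 0 0 = 0 := rfl
  rw [h0] at h
  unfold pvLineA pvLineB
  cases hcut : pvFindCutB cs 0 0 with
  | none => rw [hcut] at h; simp [h]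
  | some k =>
    rw [hcut] at h
    simp only at h
    rw [h]
    have : (0 : Int) ≤ (k : Int) := Int.natCast_nonneg k
    rw [if_pos this, PySem.List.slice_to_natCast]

theorem remove_latex_comments_py_eq (text : String) :
    remove_latex_comments_py text = remove_latex_comments_py_alt text := by
  unfold remove_latex_comments_py remove_latex_comments_py_alt
  rw [funext pvLine_eq]

-- ===== VERDICT (by name: the statement is the Claim_ definition above) =====
theorem remove_latex_comments_py_spec : Claim_equal_remove_latex_comments_py := by
  intro text _
  unfold Spec_remove_latex_comments_py
  exact remove_latex_comments_py_eq text
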